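-- pv_equiv track=rewrite | github.com/RishabhS21/col100_assignments | a5-part 2/2021CS10103_assignment_5-b.py | same_tab_ahead
-- ===== SOURCE A (Python) =====
-- def same_tab_ahead(tab_list):
--     change=[]
--     for i in range(len(tab_list)):
--         if tab_list[i]>tab_list[i-1]:
--             for j in range(i+1,len(tab_list)):
--                 if tab_list[j]==tab_list[i-1]:
--                     change.append((i-1,j))   # i-1 is the element index after which it get changed
--                     break
--     return change
-- ===== SOURCE B (Python) =====
-- def same_tab_ahead(tab_list):
--     # One backward pass precomputes each position's answer, so every increase
--     # is handled in O(1) instead of rescanning the tail of the list.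
--     n = len(tab_list)
--     nxt = {}   # i -> smallest j > i with tab_list[j] == tab_list[i - 1]
--     seen = {}  # value -> smallest index of the suffix scanned so far
--     for i in range(n - 1, -1, -1):
--         j = seen.get(tab_list[i - 1])
--         if j is not None:
--             nxt[i] = j
--         seen[tab_list[i]] = i
--     change = []
--     for i in range(n):
--         if tab_list[i] > tab_list[i - 1] and i in nxt:
--             change.append((i - 1, nxt[i]))
--     return change
-- ===== Notes on version B (the rewrite author's own statement) =====
-- stated objective: faster
-- what changed: Replaces A's per-increase linear rescan of the tail with a single right-to-left pass that precomputes, via a value-to-first-index dictionary, each position's first later index holding its predecessor's value.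
import Mathlib
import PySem

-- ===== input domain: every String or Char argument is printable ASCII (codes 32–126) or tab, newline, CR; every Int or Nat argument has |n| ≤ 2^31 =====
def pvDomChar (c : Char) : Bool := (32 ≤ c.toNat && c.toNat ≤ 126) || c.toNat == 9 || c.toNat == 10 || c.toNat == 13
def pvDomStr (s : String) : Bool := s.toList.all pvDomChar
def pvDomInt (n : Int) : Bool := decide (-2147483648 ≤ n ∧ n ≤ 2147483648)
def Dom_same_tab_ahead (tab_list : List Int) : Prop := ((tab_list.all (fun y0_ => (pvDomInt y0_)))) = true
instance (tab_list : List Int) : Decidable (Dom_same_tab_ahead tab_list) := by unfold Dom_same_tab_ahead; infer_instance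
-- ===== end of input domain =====

-- B replaces A's quadratic rescan with one backward pass precomputing, for each
-- position, the first later index holding its predecessor's value (faster algorithm).

-- ===== PORT A =====
-- inner 'for j in range(i+1, len(tab_list)): if tab_list[j] == v: …; break'
-- (first j in js with tab_list[j] == v, none if the loop falls through)
def innerA (a : List Int) (v : Int) : List Int → Option Int
  | [] => none
  | j :: rest => if PySem.List.pyGet? a j = some v then some j else innerA a v rest

def same_tab_ahead (tab_list : List Int) : List (Int × Int) :=
  (PySem.List.pyRange 0 tab_list.length 1).foldl (fun change i =>
    match PySem.List.pyGet? tab_list i, PySem.List.pyGet? tab_list (i - 1) with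
    | some ai, some aprev =>
      if aprev < ai then
        match innerA tab_list aprev (PySem.List.pyRange (i + 1) tab_list.length 1) with
        | some j => change ++ [(i - 1, j)]
        | none => change
      else change
    | _, _ => change) []  -- the 'none' cases are unreachable (i and i-1 index a nonempty list)

-- ===== PORT B =====
-- backward pass of Source B: state (nxt, seen)
def bwdB (a : List Int) (ks : List Int) : PySem.Dict Int Int × PySem.Dict Int Int :=
  ks.foldl (fun st i =>
    match PySem.List.pyGet? a (i - 1), PySem.List.pyGet? a i with
    | some pv, some vi =>
      ((match st.2.get? pv with
        | none => st.1
        | some j => st.1.insert i j),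
       st.2.insert vi i)
    | some _, none => st  -- unreachable: i and i-1 index a nonempty list
    | none, _ => st)
    (PySem.Dict.empty, PySem.Dict.empty)

def same_tab_ahead_alt (tab_list : List Int) : List (Int × Int) :=
  let n : Int := tab_list.length
  let st := bwdB tab_list (PySem.List.pyRange (n - 1) (-1) (-1))
  (PySem.List.pyRange 0 n 1).foldl (fun change i =>
    match PySem.List.pyGet? tab_list i, PySem.List.pyGet? tab_list (i - 1) with
    | some ai, some aprev =>
      if aprev < ai then
        match st.1.get? i with
        | none => change
        | some j => change ++ [(i - 1, j)]
      else change
    | some _, none => change  -- unreachable: i and i-1 index a nonempty list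
    | none, _ => change) []

-- ===== PRECONDITION & SPEC =====
def Spec_same_tab_ahead (tab_list : List Int) (out : List (Int × Int)) : Prop := out = same_tab_ahead_alt tab_list
instance (tab_list : List Int) (out : List (Int × Int)) : Decidable (Spec_same_tab_ahead tab_list out) := by unfold Spec_same_tab_ahead; infer_instance

-- ===== CLAIM (what is proved, stated in full; the proofs are below) =====
def Claim_equal_same_tab_ahead : Prop := ∀ (tab_list : List Int), Dom_same_tab_ahead tab_list → Spec_same_tab_ahead tab_list (same_tab_ahead tab_list)

-- ===== LEMMAS AND PROOFS =====

-- index i-1 of the list is valid whenever 0 ≤ i < length (Python's negative indexing at i = 0)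
theorem pyGet_pred_some (a : List Int) (i : Int) (h0 : 0 ≤ i) (hn : i < (a.length : Int)) :
    ∃ pv, PySem.List.pyGet? a (i - 1) = some pv := by
  cases h : PySem.List.pyGet? a (i - 1) with
  | some pv => exact ⟨pv, rfl⟩
  | none =>
    rw [PySem.List.pyGet?_eq_none_iff] at h
    exact absurd (by constructor <;> omega) h

-- invariant of Source B's backward pass: after processing indices n-1 … s,
-- `seen` maps each value to its first occurrence at index ≥ s, and `nxt` maps
-- each index k ≥ s to the first later index holding the value of a[k-1] (A's inner loop).
theorem bwd_spec (a : List Int) (s : Int) (hs0 : 0 ≤ s) (hsn : s ≤ (a.length : Int)) :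
    (∀ v : Int, (bwdB a (PySem.List.pyRange ((a.length : Int) - 1) (s - 1) (-1))).2.get? v
        = innerA a v (PySem.List.pyRange s (a.length : Int) 1)) ∧
    (∀ k : Int, (bwdB a (PySem.List.pyRange ((a.length : Int) - 1) (s - 1) (-1))).1.get? k
        = if s ≤ k ∧ k < (a.length : Int) then
            (match PySem.List.pyGet? a (k - 1) with
             | some pv => innerA a pv (PySem.List.pyRange (k + 1) (a.length : Int) 1)
             | none => none)
          else none) := by
  obtain ⟨m, hm⟩ : ∃ m : Nat, ((a.length : Int) - s).toNat = m := ⟨_, rfl⟩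
  induction m generalizing s with
  | zero =>
    have hs : s = (a.length : Int) := by omega
    subst hs
    rw [PySem.List.pyRange_neg_one_eq_nil (by omega)]
    constructor
    · intro v
      rw [PySem.List.pyRange_one_eq_nil (by omega)]
      simp [bwdB, innerA]
    · intro k
      simp only [bwdB, List.foldl_nil]
      rw [if_neg (by omega)]
      simp
  | succ m ih =>
    have hsn' : s < (a.length : Int) := by omega
    have hrange : PySem.List.pyRange ((a.length : Int) - 1) (s - 1) (-1)
        = PySem.List.pyRange ((a.length : Int) - 1) s (-1) ++ [s] := by
      rw [PySem.List.pyRange_neg_one_eq_reverse, PySem.List.pyRange_neg_one_eq_reverse]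
      have h1 : s - 1 + 1 = s := by ring
      rw [h1, PySem.List.pyRange_one_cons (by omega)]
      simp
    obtain ⟨ihl, ihn⟩ := ih (s + 1) (by omega) (by omega) (by omega)
    simp only [add_sub_cancel_right] at ihl ihn
    have hget : PySem.List.pyGet? a s = some (a[s.toNat]'(by omega)) :=
      PySem.List.pyGet?_eq_some_getElem a hs0 hsn'
    obtain ⟨pv, hpv⟩ := pyGet_pred_some a s hs0 hsn'
    have hstep : bwdB a (PySem.List.pyRange ((a.length : Int) - 1) (s - 1) (-1))
        = ((match (bwdB a (PySem.List.pyRange ((a.length : Int) - 1) s (-1))).2.get? pv with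
            | none => (bwdB a (PySem.List.pyRange ((a.length : Int) - 1) s (-1))).1
            | some j => (bwdB a (PySem.List.pyRange ((a.length : Int) - 1) s (-1))).1.insert s j),
           (bwdB a (PySem.List.pyRange ((a.length : Int) - 1) s (-1))).2.insert
              (a[s.toNat]'(by omega)) s) := by
      rw [hrange]
      simp only [bwdB, List.foldl_append, List.foldl_cons, List.foldl_nil, hget, hpv]
    rw [hstep]
    constructor
    · intro v
      rw [PySem.List.pyRange_one_cons hsn']
      by_cases hv : v = a[s.toNat]'(by omega)
      · subst hv
        simp only [innerA, hget]
        simp only [if_true]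
        apply PySem.Dict.get?_insert_self
      · simp only [innerA, hget]
        rw [if_neg (fun h => hv (Option.some.inj h).symm)]
        exact (PySem.Dict.get?_insert_of_ne _ _ hv).trans (ihl v)
    · intro k
      by_cases hk : k = s
      · subst hk
        rw [if_pos ⟨le_refl _, hsn'⟩, hpv]
        cases hDv : (bwdB a (PySem.List.pyRange ((a.length : Int) - 1) k (-1))).2.get? pv with
        | none =>
          have h1 := ihn k
          rw [if_neg (by omega)] at h1
          have h2 := ihl pv
          rw [hDv] at h2
          exact h1.trans h2
        | some j =>
          have h2 := ihl pv
          rw [hDv] at h2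
          rw [show (match some pv with
              | some v => innerA a v (PySem.List.pyRange (k + 1) ((a.length : Int)) 1)
              | none => (none : Option Int)) = innerA (a := a) pv
                (PySem.List.pyRange (k + 1) ((a.length : Int)) 1) from rfl, ← h2]
          apply PySem.Dict.get?_insert_self
      · cases hDv : (bwdB a (PySem.List.pyRange ((a.length : Int) - 1) s (-1))).2.get? pv with
        | none =>
          have h1 := ihn k
          have hcond : (s ≤ k ∧ k < (a.length : Int)) ↔ (s + 1 ≤ k ∧ k < (a.length : Int)) := by
            omega
          rw [if_congr hcond rfl rfl]
          exact h1
        | some j =>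
          have h1 := ihn k
          have hcond : (s ≤ k ∧ k < (a.length : Int)) ↔ (s + 1 ≤ k ∧ k < (a.length : Int)) := by
            omega
          rw [if_congr hcond rfl rfl]
          exact (PySem.Dict.get?_insert_of_ne _ _ hk).trans h1

-- ===== VERDICT (by name: the statement is the Claim_ definition above) =====
theorem same_tab_ahead_spec : Claim_equal_same_tab_ahead := by
  intro a _
  unfold Spec_same_tab_ahead
  obtain ⟨_, spec1⟩ := bwd_spec a 0 le_rfl (by positivity)
  simp only [zero_sub] at spec1
  simp only [same_tab_ahead, same_tab_ahead_alt]
  apply PySem.List.foldl_congr_mem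
  intro acc i hi
  rw [PySem.List.mem_pyRange_one] at hi
  have hgi : PySem.List.pyGet? a i = some (a[i.toNat]'(by omega)) :=
    PySem.List.pyGet?_eq_some_getElem a (by omega) (by omega)
  obtain ⟨pv, hpv⟩ := pyGet_pred_some a i (by omega) (by omega)
  simp only [hgi, hpv]
  by_cases hc : pv < a[i.toNat]'(by omega)
  · rw [if_pos hc, if_pos hc, spec1 i, if_pos (by constructor <;> omega), hpv]
    cases h2 : innerA a pv (PySem.List.pyRange (i + 1) (a.length : Int) 1) <;> simp [h2]
  · rw [if_neg hc, if_neg hc]
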